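-- pv_equiv track=rewrite | github.com/xaxixak/Wiz-Wi | api/token_budget.py | truncate_to_budget
-- ===== SOURCE A (Python) =====
-- def estimate_tokens(text: str) -> int:
--     """
--     Rough token estimate: ~4 characters per token on average.
--
--     This is a widely-used heuristic that works across English prose, code, and
--     structured text. It deliberately errs on the high side so we stay under
--     budget rather than over.
--     """
--     return len(text) // 4
--
-- def truncate_to_budget(formatted: str, max_tokens: int) -> str:
--     """
--     Trim a formatted context pack string to fit within *max_tokens*.
--
--     Truncation priority (last removed first):
--       1. Code Snippets
--       2. Patterns
--       3. Invariants
--       4. Edges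
--       5. Downstream Effects
--       6. Upstream Dependencies
--       7. Relevant Nodes
--       8. Stale Warnings
--       9. Risk
--      10. Header (scope/focus) -- never removed
--
--     We remove entire sections from the bottom of the priority list first,
--     then character-trim the last retained section if needed.
--     """
--     if max_tokens <= 0 or estimate_tokens(formatted) <= max_tokens:
--         return formatted
--
--     # Section markers in removal order (lowest priority first)
--     removal_order = [
--         "--- Code Snippets",
--         "--- Patterns",
--         "--- Invariants",
--         "--- Downstream Effects",
--         "--- Upstream Dependencies",
--         "--- Edges",
--         "--- Stale Warnings",
--     ]
--
--     result = formatted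
--     for marker in removal_order:
--         if estimate_tokens(result) <= max_tokens:
--             break
--         idx = result.find(marker)
--         if idx == -1:
--             continue
--         # Find next section boundary or end of string
--         next_section = len(result)
--         search_start = idx + len(marker)
--         while search_start < len(result):
--             nl = result.find("\n---", search_start)
--             if nl == -1:
--                 break
--             next_section = nl
--             break
--         # Remove this section
--         result = result[:idx] + result[next_section:]
--
--     # If still over budget, hard-truncate with a notice
--     char_budget = max_tokens * 4
--     if len(result) > char_budget:
--         result = result[:char_budget].rstrip()
--         result += "\n\n... [truncated to fit token budget] ..."
--
--     return result
-- ===== SOURCE B (Python) =====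
-- def truncate_to_budget(formatted: str, max_tokens: int) -> str:
--     """Trim a formatted context pack string to fit within *max_tokens*.
--
--     Recursive reformulation: sections are dropped via str.partition and
--     slicing relative to the tail, instead of absolute index arithmetic.
--     """
--     if max_tokens <= 0 or len(formatted) // 4 <= max_tokens:
--         return formatted
--
--     def drop_section(text: str, marker: str) -> str:
--         head, sep, tail = text.partition(marker)
--         if not sep:
--             return text
--         cut = tail.find("\n---")
--         return head + (tail[cut:] if cut != -1 else "")
--
--     def shrink(text: str, markers) -> str:
--         if not markers or len(text) // 4 <= max_tokens:
--             return text
--         return shrink(drop_section(text, markers[0]), markers[1:])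
--
--     result = shrink(formatted, [
--         "--- Code Snippets",
--         "--- Patterns",
--         "--- Invariants",
--         "--- Downstream Effects",
--         "--- Upstream Dependencies",
--         "--- Edges",
--         "--- Stale Warnings",
--     ])
--
--     budget = max_tokens * 4
--     if len(result) <= budget:
--         return result
--     return result[:budget].rstrip() + "\n\n... [truncated to fit token budget] ..."
-- ===== Notes on version B (the rewrite author's own statement) =====
-- stated objective: simpler
-- what changed: The index-arithmetic splicing (absolute find indices, slice concatenation, and a degenerate one-shot while-loop) is replaced by a recursive shrink over the marker list that drops a section via str.partition and slicing relative to the tail.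
import Mathlib
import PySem

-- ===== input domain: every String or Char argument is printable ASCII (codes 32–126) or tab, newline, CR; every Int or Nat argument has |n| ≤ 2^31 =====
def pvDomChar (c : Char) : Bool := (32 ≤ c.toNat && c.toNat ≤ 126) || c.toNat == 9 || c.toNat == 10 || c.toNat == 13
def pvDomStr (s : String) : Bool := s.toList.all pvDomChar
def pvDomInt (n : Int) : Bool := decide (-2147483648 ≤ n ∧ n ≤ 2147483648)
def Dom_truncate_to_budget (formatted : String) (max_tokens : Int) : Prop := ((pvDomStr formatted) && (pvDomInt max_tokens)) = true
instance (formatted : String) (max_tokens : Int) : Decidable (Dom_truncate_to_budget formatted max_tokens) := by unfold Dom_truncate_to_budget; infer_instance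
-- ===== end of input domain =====

-- B replaces A's absolute-index splicing and degenerate inner while-loop by a recursive
-- shrink over the marker list using a partition helper and tail-relative slicing (objective: simpler).

-- ===== PORT A =====
def pvEstimateTokens (text : List Char) : Int :=
  PySem.Int.floordiv (text.length : Int) 4

def pvRemovalLoopA (max_tokens : Int) : List (List Char) → List Char → List Char
  | [], result => result
  | marker :: ms, result =>
    if pvEstimateTokens result ≤ max_tokens then result  -- break
    else
      let idx := PySem.Chars.find result marker
      if idx = -1 then pvRemovalLoopA max_tokens ms result  -- continue
      else
        let searchStart := idx + (marker.length : Int)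
        -- A's inner `while` executes its body at most once (every path breaks immediately):
        -- ported step for step as the conditional it performs
        let nextSection :=
          if searchStart < (result.length : Int) then
            let nl := PySem.Chars.findFrom result "\n---".toList searchStart
            if nl = -1 then (result.length : Int) else nl
          else (result.length : Int)
        pvRemovalLoopA max_tokens ms
          (PySem.List.slice result none (some idx) ++ PySem.List.slice result (some nextSection) none)

def truncate_to_budget (formatted : String) (max_tokens : Int) : String :=
  if max_tokens ≤ 0 ∨ pvEstimateTokens formatted.toList ≤ max_tokens then formatted
  else
    let result := pvRemovalLoopA max_tokens
      ["--- Code Snippets".toList, "--- Patterns".toList, "--- Invariants".toList,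
       "--- Downstream Effects".toList, "--- Upstream Dependencies".toList,
       "--- Edges".toList, "--- Stale Warnings".toList] formatted.toList
    let char_budget := max_tokens * 4
    if (result.length : Int) > char_budget then
      String.ofList (PySem.Chars.rstrip (PySem.List.slice result none (some char_budget)) ++
        "\n\n... [truncated to fit token budget] ...".toList)
    else String.ofList result

-- ===== PORT B =====
-- str.partition(pat): split at the first occurrence (hand port; PySem has no partition primitive;
-- exact for the nonempty literal markers it is called with)
def pvPartition (text pat : List Char) : List Char × List Char × List Char :=
  let i := PySem.Chars.find text pat
  if i = -1 then (text, [], [])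
  else (text.take i.toNat, pat, text.drop (i.toNat + pat.length))

def pvDropSection (text marker : List Char) : List Char :=
  match pvPartition text marker with
  | (head, sep, tail) =>
    if sep = [] then text
    else
      let cut := PySem.Chars.find tail "\n---".toList
      head ++ (if cut ≠ -1 then PySem.List.slice tail (some cut) none else [])

def pvShrink (max_tokens : Int) : List (List Char) → List Char → List Char
  | [], text => text
  | marker :: ms, text =>
    if PySem.Int.floordiv (text.length : Int) 4 ≤ max_tokens then text
    else pvShrink max_tokens ms (pvDropSection text marker)

def truncate_to_budget_alt (formatted : String) (max_tokens : Int) : String :=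
  if max_tokens ≤ 0 ∨ PySem.Int.floordiv (formatted.toList.length : Int) 4 ≤ max_tokens then formatted
  else
    let result := pvShrink max_tokens
      ["--- Code Snippets".toList, "--- Patterns".toList, "--- Invariants".toList,
       "--- Downstream Effects".toList, "--- Upstream Dependencies".toList,
       "--- Edges".toList, "--- Stale Warnings".toList] formatted.toList
    let budget := max_tokens * 4
    if (result.length : Int) ≤ budget then String.ofList result
    else
      String.ofList (PySem.Chars.rstrip (PySem.List.slice result none (some budget)) ++
        "\n\n... [truncated to fit token budget] ...".toList)

-- ===== PRECONDITION & SPEC =====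
def Spec_truncate_to_budget (formatted : String) (max_tokens : Int) (out : String) : Prop := out = truncate_to_budget_alt formatted max_tokens
instance (formatted : String) (max_tokens : Int) (out : String) : Decidable (Spec_truncate_to_budget formatted max_tokens out) := by unfold Spec_truncate_to_budget; infer_instance

-- ===== CLAIM (what is proved, stated in full; the proofs are below) =====
def Claim_equal_truncate_to_budget : Prop := ∀ (formatted : String) (max_tokens : Int), Dom_truncate_to_budget formatted max_tokens → Spec_truncate_to_budget formatted max_tokens (truncate_to_budget formatted max_tokens)

-- ===== LEMMAS AND PROOFS =====

-- B's partition-based section drop computes exactly A's splice, for a nonempty marker.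
lemma pvDropSection_eq_spliceA (text marker : List Char) (hm : marker ≠ []) :
    pvDropSection text marker =
      if PySem.Chars.find text marker = -1 then text
      else
        let idx := PySem.Chars.find text marker
        let searchStart := idx + (marker.length : Int)
        let nextSection :=
          if searchStart < (text.length : Int) then
            let nl := PySem.Chars.findFrom text "\n---".toList searchStart
            if nl = -1 then (text.length : Int) else nl
          else (text.length : Int)
        PySem.List.slice text none (some idx) ++ PySem.List.slice text (some nextSection) none := by
  by_cases hf : PySem.Chars.find text marker = -1
  · rw [if_pos hf]
    simp [pvDropSection, pvPartition, hf]
  · have h0 : 0 ≤ PySem.Chars.find text marker := by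
      have := PySem.Chars.neg_one_le_find text marker; omega
    obtain ⟨n, hn⟩ : ∃ n : ℕ, PySem.Chars.find text marker = (n : Int) :=
      ⟨_, (Int.toNat_of_nonneg h0).symm⟩
    have hpre : marker <+: List.drop n text := by
      have := (PySem.Chars.find_spec (s := text) (sub := marker) h0).1
      rwa [hn, Int.toNat_natCast] at this
    have hk : n + marker.length ≤ text.length := by
      have h1 : marker.length ≤ (List.drop n text).length := hpre.length_le
      have h2 : ((n : Int)) ≤ (text.length : Int) := by
        rw [← hn]; exact PySem.Chars.find_le_length text marker
      rw [List.length_drop] at h1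
      omega
    rw [if_neg hf]
    simp only [pvDropSection, pvPartition, hn]
    have hne : ¬ ((n : Int) = -1) := by omega
    rw [if_neg hne, if_neg hm]
    simp only [Int.toNat_natCast, show "\n---".toList = ['\n','-','-','-'] from rfl]
    have hcast : (n : Int) + (marker.length : Int) = ((n + marker.length : Nat) : Int) := by
      push_cast; ring
    have hsl : PySem.List.slice text none (some ((n : Int))) = List.take n text := by
      rw [PySem.List.slice_to text (by positivity)]; simp
    rw [hcast, hsl]
    by_cases hlt : n + marker.length < text.length
    · have hlt' : ((n + marker.length : Nat) : Int) < ((text.length : Nat) : Int) := by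
        exact_mod_cast hlt
      rw [if_pos hlt', PySem.Chars.findFrom_natCast text (['\n','-','-','-'] : List Char) (n + marker.length) hk]
      by_cases hc : PySem.Chars.find (List.drop (n + marker.length) text) ['\n','-','-','-'] = -1
      · have hcut : ¬ (PySem.Chars.find (List.drop (n + marker.length) text) ['\n','-','-','-'] ≠ -1) := by
          simp [hc]
        have hneg1 : (-1 : Int) = -1 := rfl
        rw [if_neg hcut, if_pos hc, if_pos hneg1,
          PySem.List.slice_from text (by positivity : (0:Int) ≤ ((text.length : Nat) : Int))]
        simp
      · have hc0 : 0 ≤ PySem.Chars.find (List.drop (n + marker.length) text) ['\n','-','-','-'] := by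
          have := PySem.Chars.neg_one_le_find (List.drop (n + marker.length) text) ['\n','-','-','-']
          omega
        obtain ⟨c, hcv⟩ : ∃ c : ℕ,
            PySem.Chars.find (List.drop (n + marker.length) text) ['\n','-','-','-'] = (c : Int) :=
          ⟨_, (Int.toNat_of_nonneg hc0).symm⟩
        have hcut : PySem.Chars.find (List.drop (n + marker.length) text) ['\n','-','-','-'] ≠ -1 := hc
        have hnl : ¬ (((n + marker.length : Nat) : Int) +
            PySem.Chars.find (List.drop (n + marker.length) text) ['\n','-','-','-'] = -1) := by
          omega
        rw [if_pos hcut, if_neg hc, if_neg hnl, hcv,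
          PySem.List.slice_from (List.drop (n + marker.length) text)
            (by positivity : (0:Int) ≤ ((c : Nat) : Int))]
        have hsum : ((n + marker.length : Nat) : Int) + ((c : Nat) : Int)
            = ((n + marker.length + c : Nat) : Int) := by push_cast; ring
        rw [hsum, PySem.List.slice_from text (by positivity : (0:Int) ≤ ((n + marker.length + c : Nat) : Int))]
        simp only [Int.toNat_natCast, List.drop_drop]
    · have hlt' : ¬ (((n + marker.length : Nat) : Int) < ((text.length : Nat) : Int)) := by
        exact_mod_cast hlt
      have hke : n + marker.length = text.length := by omega
      rw [if_neg hlt', hke, List.drop_length]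
      have hcut : ¬ (PySem.Chars.find ([] : List Char) ['\n','-','-','-'] ≠ -1) := by decide
      rw [if_neg hcut,
        PySem.List.slice_from text (by positivity : (0:Int) ≤ ((text.length : Nat) : Int))]
      simp

lemma pvShrink_eq_loopA (max_tokens : Int) (ms : List (List Char)) (h : ∀ m ∈ ms, m ≠ [])
    (text : List Char) : pvShrink max_tokens ms text = pvRemovalLoopA max_tokens ms text := by
  induction ms generalizing text with
  | nil => rfl
  | cons m ms ih =>
    have hm : m ≠ [] := h m (List.mem_cons_self ..)
    have hms : ∀ x ∈ ms, x ≠ [] := fun x hx => h x (List.mem_cons_of_mem _ hx)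
    simp only [pvShrink, pvRemovalLoopA, pvEstimateTokens, pvDropSection_eq_spliceA text m hm]
    by_cases hb : PySem.Int.floordiv ((text.length : Nat) : Int) 4 ≤ max_tokens
    · rw [if_pos hb, if_pos hb]
    · rw [if_neg hb, if_neg hb]
      by_cases hfind : PySem.Chars.find text m = -1
      · rw [if_pos hfind, if_pos hfind]; exact ih hms text
      · rw [if_neg hfind, if_neg hfind]; exact ih hms _

-- ===== VERDICT (by name: the statement is the Claim_ definition above) =====
theorem truncate_to_budget_spec : Claim_equal_truncate_to_budget := by
  intro formatted max_tokens _hdom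
  unfold Spec_truncate_to_budget truncate_to_budget truncate_to_budget_alt
  have heq := pvShrink_eq_loopA max_tokens
    ["--- Code Snippets".toList, "--- Patterns".toList, "--- Invariants".toList,
     "--- Downstream Effects".toList, "--- Upstream Dependencies".toList,
     "--- Edges".toList, "--- Stale Warnings".toList] (by decide) formatted.toList
  simp only [pvEstimateTokens, heq]
  by_cases h0 : max_tokens ≤ 0 ∨ PySem.Int.floordiv ((formatted.toList.length : Nat) : Int) 4 ≤ max_tokens
  · rw [if_pos h0, if_pos h0]
  · rw [if_neg h0, if_neg h0]
    set L := pvRemovalLoopA max_tokens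
      ["--- Code Snippets".toList, "--- Patterns".toList, "--- Invariants".toList,
       "--- Downstream Effects".toList, "--- Upstream Dependencies".toList,
       "--- Edges".toList, "--- Stale Warnings".toList] formatted.toList with hL
    by_cases hb : ((L.length : Nat) : Int) ≤ max_tokens * 4
    · have hb2 : ¬ (((L.length : Nat) : Int) > max_tokens * 4) := by omega
      rw [if_neg hb2, if_pos hb]
    · have hb2 : ((L.length : Nat) : Int) > max_tokens * 4 := by omega
      rw [if_pos hb2, if_neg hb]
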